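-- pv_equiv track=rewrite | github.com/felixrauh/conference_scheduler | src/phase2.py | compute_block_hopping
-- ===== SOURCE A (Python) =====
-- from typing import Dict, List, Set, Tuple, Optional
--
-- def compute_participant_hopping(
--     block_tuples: List[Tuple[str, ...]],
--     participant_prefs: Set[str]
-- ) -> int:
--     """
--     Compute minimum room switches for one participant in a block.
--
--     Uses dynamic programming to find the optimal choice of rooms when
--     the participant prefers multiple talks in a tuple.
--
--     Args:
--         block_tuples: Ordered list of tuples in the block (each tuple has n talks in rooms 0..n-1)
--         participant_prefs: Set of talk_ids this participant wants to attend
--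
--     Returns:
--         Minimum number of room switches needed to attend preferred talks
--     """
--     if not block_tuples:
--         return 0
--
--     n_rooms = len(block_tuples[0])
--     k = len(block_tuples)
--
--     # Get preferred rooms per tuple
--     preferred_rooms = []
--     for ntuple in block_tuples:
--         rooms = set()
--         for r, t in enumerate(ntuple):
--             if t in participant_prefs:
--                 rooms.add(r)
--         preferred_rooms.append(rooms)
--
--     # If 0 or 1 tuples have preferences, no room switches
--     attended_count = sum(1 for rooms in preferred_rooms if rooms)
--     if attended_count <= 1:
--         return 0
--
--     # DP: dp[r] = min switches to be in room r at current tuple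
--     INF = float('inf')
--     dp = [INF] * n_rooms
--
--     # Initialize with first tuple that has preferences
--     first_idx = None
--     for i, rooms in enumerate(preferred_rooms):
--         if rooms:
--             first_idx = i
--             for r in rooms:
--                 dp[r] = 0
--             break
--
--     if first_idx is None:
--         return 0
--
--     # Process remaining tuples
--     for i in range(first_idx + 1, k):
--         if preferred_rooms[i]:
--             # Must attend one of these rooms - compute min cost to reach each
--             new_dp = [INF] * n_rooms
--             for r in preferred_rooms[i]:
--                 for prev_r in range(n_rooms):
--                     if dp[prev_r] < INF:
--                         cost = dp[prev_r] + (0 if prev_r == r else 1)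
--                         new_dp[r] = min(new_dp[r], cost)
--             dp = new_dp
--         # If no preference at this tuple, dp stays the same (no room switch needed)
--
--     # Return minimum cost at the last attended tuple
--     return min(dp[r] for r in range(n_rooms) if dp[r] < INF)
--
-- def compute_block_hopping(
--     block_tuples: List[Tuple[str, ...]],
--     preferences: Dict[str, Set[str]]
-- ) -> int:
--     """Compute total room hopping for a block across all participants."""
--     total = 0
--     for p_id, prefs in preferences.items():
--         total += compute_participant_hopping(block_tuples, prefs)
--     return total
-- ===== SOURCE B (Python) =====
-- def compute_block_hopping(block_tuples, preferences):
--     """Compute total room hopping for a block across all participants."""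
--     return sum(_participant_min_switches(block_tuples, prefs)
--                for prefs in preferences.values())
--
--
-- def _participant_min_switches(block_tuples, prefs):
--     # dp maps room -> min switches to sit in that room at the latest
--     # attended tuple; transitions use the global minimum: staying costs
--     # nothing, coming from anywhere else costs one switch.
--     dp = None
--     for ntuple in block_tuples:
--         rooms = [r for r, t in enumerate(ntuple) if t in prefs]
--         if not rooms:
--             continue
--         if dp is None:
--             dp = {r: 0 for r in rooms}
--         else:
--             m = min(dp.values())
--             dp = {r: min(dp.get(r, m + 1), m + 1) for r in rooms}
--     return 0 if dp is None else min(dp.values())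
-- ===== Notes on version B (the rewrite author's own statement) =====
-- stated objective: faster
-- what changed: Per participant, B replaces A's INF-array DP whose transition scans all n previous rooms for each target room by a sparse room->cost dict updated with the global minimum (new cost = min(dp.get(r, m+1), m+1)), dropping the empty-tuple skipping/first-index bookkeeping into one fold.
import Mathlib
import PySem

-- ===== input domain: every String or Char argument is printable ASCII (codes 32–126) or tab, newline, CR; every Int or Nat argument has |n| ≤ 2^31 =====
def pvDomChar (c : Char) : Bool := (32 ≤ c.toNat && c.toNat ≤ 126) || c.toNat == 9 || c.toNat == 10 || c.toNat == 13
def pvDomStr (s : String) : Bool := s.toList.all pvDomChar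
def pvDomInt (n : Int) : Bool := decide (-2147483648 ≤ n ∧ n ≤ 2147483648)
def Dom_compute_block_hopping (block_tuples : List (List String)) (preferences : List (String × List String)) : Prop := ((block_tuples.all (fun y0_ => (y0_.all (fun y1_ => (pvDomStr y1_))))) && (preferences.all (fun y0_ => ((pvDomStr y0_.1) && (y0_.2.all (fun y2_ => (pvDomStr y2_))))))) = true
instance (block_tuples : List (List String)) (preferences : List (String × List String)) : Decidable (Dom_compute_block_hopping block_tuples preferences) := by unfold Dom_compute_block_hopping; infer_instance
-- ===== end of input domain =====

-- B replaces A's inner scan over all previous rooms by a global-minimum DP transition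
-- kept in a room→cost dict; return values agree on Pre_.

-- ===== PORT A =====
-- dict(preferences): duplicate participant ids overwrite in place (Python dict semantics);
-- shared marshalling helper for both ports.
def pvPrefItems (preferences : List (String × List String)) : List (String × List String) :=
  (preferences.foldl (fun d p => d.insert p.1 p.2) (PySem.Dict.empty)).items

-- rooms = set(); for r, t in enumerate(ntuple): if t in prefs: rooms.add(r)
-- (the added indices are fresh and increasing, so set.add appends; kept as List Nat)
def pvRoomsA (prefs : List String) (ntuple : List String) : List Nat :=
  ntuple.zipIdx.foldl (fun rooms q => if prefs.contains q.1 then rooms ++ [q.2] else rooms) []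

-- min(x, cost) where `none` models INF
def pvMinO (o : Option Int) (c : Int) : Int := match o with | none => c | some v => min v c

-- inner loop `for prev_r in range(n_rooms): if dp[prev_r] < INF: ... new_dp[r] = min(new_dp[r], cost)`
-- (none result = IndexError on new_dp[r])
def pvA_inner (dp : List (Option Int)) (r : Nat) (n : Nat) (nd0 : List (Option Int)) : Option (List (Option Int)) :=
  (List.range n).foldl
    (fun acc prev => acc.bind (fun nd =>
      match dp.getD prev none with
      | none => some nd
      | some v =>
        if r < nd.length then
          some (nd.set r (some (pvMinO (nd.getD r none) (v + (if prev = r then 0 else 1)))))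
        else none))
    (some nd0)

-- `new_dp = [INF]*n_rooms; for r in preferred_rooms[i]: for prev_r in ...`
def pvA_step (n : Nat) (dp : List (Option Int)) (rooms : List Nat) : Option (List (Option Int)) :=
  rooms.foldl (fun acc r => acc.bind (fun nd => pvA_inner dp r n nd))
    (some (List.replicate n (none : Option Int)))

-- `for i in range(first_idx+1, k): if preferred_rooms[i]: dp = new_dp`
def pvA_loop (n : Nat) (dp0 : Option (List (Option Int))) (rest : List (List Nat)) : Option (List (Option Int)) :=
  rest.foldl (fun acc rooms => if rooms.isEmpty then acc else acc.bind (fun dp => pvA_step n dp rooms)) dp0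

-- `dp = [INF]*n_rooms; ... for r in rooms: dp[r] = 0`  (none result = IndexError)
def pvA_init (n : Nat) (rooms : List Nat) : Option (List (Option Int)) :=
  rooms.foldl (fun acc r => acc.bind (fun dp => if r < dp.length then some (dp.set r (some 0)) else none))
    (some (List.replicate n (none : Option Int)))

-- find first_idx (first tuple with preferences), run the DP, take the final min
-- `min(dp[r] for r in range(n_rooms) if dp[r] < INF)` (min? of [] = ValueError)
def pvA_find (n : Nat) : List (List Nat) → Option Int
  | [] => some 0   -- first_idx is None: return 0
  | rooms :: rest =>
    if rooms.isEmpty then pvA_find n rest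
    else
      ((pvA_init n rooms).bind (fun dp => pvA_loop n (some dp) rest)).bind
        (fun dp => PySem.List.min? ((List.range n).filterMap (fun r => dp.getD r none)) (fun x => x))

-- compute_participant_hopping; `none` = the Python raises (IndexError)
def pvA_part (block_tuples : List (List String)) (prefs : List String) : Option Int :=
  match block_tuples with
  | [] => some 0
  | t0 :: _ =>
    let n := t0.length
    let preferred := block_tuples.map (pvRoomsA prefs)
    if (preferred.filter (fun rs => !rs.isEmpty)).length ≤ 1 then some 0
    else pvA_find n preferred

def compute_block_hopping (block_tuples : List (List String)) (preferences : List (String × List String)) : Int :=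
  ((pvPrefItems preferences).foldl
    (fun acc p => acc.bind (fun t => (pvA_part block_tuples p.2).map (fun v => t + v)))
    (some 0)).getD 0   -- none = exception, excluded by Pre_; .getD 0 only totalizes

-- ===== PORT B =====
-- rooms = [r for r, t in enumerate(ntuple) if t in prefs]
def pvRoomsB (prefs : List String) (ntuple : List String) : List Nat :=
  (ntuple.zipIdx.filter (fun q => prefs.contains q.1)).map (fun q => q.2)

-- {r: f(r) for r in rooms}
def pvB_dictOf (rooms : List Nat) (f : Nat → Int) : PySem.Dict Nat Int :=
  rooms.foldl (fun d r => d.insert r (f r)) PySem.Dict.empty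

-- min(dp.values()); dp is never empty where this is used, .getD 0 only totalizes
def pvB_min (d : PySem.Dict Nat Int) : Int :=
  (PySem.List.min? (PySem.Dict.values d) (fun x => x)).getD 0

-- _participant_min_switches
def pvB_part (block_tuples : List (List String)) (prefs : List String) : Int :=
  let dp := block_tuples.foldl (fun dp ntuple =>
      let rooms := pvRoomsB prefs ntuple
      if rooms.isEmpty then dp
      else match dp with
        | none => some (pvB_dictOf rooms (fun _ => 0))
        | some d =>
          let m := pvB_min d
          some (pvB_dictOf rooms (fun r => min (PySem.Dict.getD d r (m + 1)) (m + 1))))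
    (none : Option (PySem.Dict Nat Int))
  match dp with
  | none => 0
  | some d => pvB_min d

def compute_block_hopping_alt (block_tuples : List (List String)) (preferences : List (String × List String)) : Int :=
  ((pvPrefItems preferences).map (fun p => pvB_part block_tuples p.2)).sum

-- ===== PRECONDITION & SPEC =====
-- A raises IndexError for a participant iff ≥ 2 tuples contain a preferred talk AND some
-- preferred talk sits at a position ≥ len(block_tuples[0]) (a ragged block).
def pvBad (block_tuples : List (List String)) (prefs : List String) : Bool :=
  decide (2 ≤ (block_tuples.filter (fun tp => tp.any (fun t => prefs.contains t))).length) &&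
  block_tuples.any (fun tp => tp.zipIdx.any (fun q => prefs.contains q.1 && decide (block_tuples.headI.length ≤ q.2)))

-- Pre_ excludes exactly the inputs on which A raises IndexError (ragged blocks where a
-- participant's preferred talk lies at a room index beyond the first tuple's width).
def Pre_compute_block_hopping (block_tuples : List (List String)) (preferences : List (String × List String)) : Prop :=
  ∀ p ∈ pvPrefItems preferences, pvBad block_tuples p.2 = false
instance (block_tuples : List (List String)) (preferences : List (String × List String)) : Decidable (Pre_compute_block_hopping block_tuples preferences) := by unfold Pre_compute_block_hopping; infer_instance

def pvWitness_compute_block_hopping : List (List String) × (List (String × List String)) :=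
  ([["a", "b"], ["c", "a"]], [("p", ["a"])])

def Spec_compute_block_hopping (block_tuples : List (List String)) (preferences : List (String × List String)) (out : Int) : Prop := out = compute_block_hopping_alt block_tuples preferences
instance (block_tuples : List (List String)) (preferences : List (String × List String)) (out : Int) : Decidable (Spec_compute_block_hopping block_tuples preferences out) := by unfold Spec_compute_block_hopping; infer_instance

-- ===== CLAIM (what is proved, stated in full; the proofs are below) =====
def Claim_equal_compute_block_hopping : Prop := ∀ (block_tuples : List (List String)) (preferences : List (String × List String)), Dom_compute_block_hopping block_tuples preferences → Pre_compute_block_hopping block_tuples preferences → Spec_compute_block_hopping block_tuples preferences (compute_block_hopping block_tuples preferences)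

-- ===== LEMMAS AND PROOFS =====

-- the two ports compute the same per-tuple room list
theorem pvRooms_eq (prefs ntuple : List String) : pvRoomsA prefs ntuple = pvRoomsB prefs ntuple := by
  unfold pvRoomsA pvRoomsB
  simpa using PySem.List.foldl_append_if (fun q : String × Nat => prefs.contains q.1)
    (fun q : String × Nat => q.2) ntuple.zipIdx []

theorem pvRooms_pairwise (prefs ntuple : List String) : (pvRoomsB prefs ntuple).Pairwise (· < ·) := by
  unfold pvRoomsB
  have hz : (ntuple.zipIdx).Pairwise (fun a b : String × Nat => a.2 < b.2) := by
    rw [List.pairwise_iff_getElem]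
    intro i j hi hj hij
    simp only [List.getElem_zipIdx]
    omega
  exact List.Pairwise.map _ (fun a b h => h) (List.Pairwise.filter _ hz)

theorem pvRooms_nodup (prefs ntuple : List String) : (pvRoomsB prefs ntuple).Nodup :=
  (pvRooms_pairwise prefs ntuple).imp (fun h => Nat.ne_of_lt h)

theorem pvRooms_nonempty_iff (prefs ntuple : List String) :
    ((pvRoomsB prefs ntuple).isEmpty = false) ↔ (ntuple.any (fun t => prefs.contains t) = true) := by
  unfold pvRoomsB
  rw [List.isEmpty_eq_false_iff, List.any_eq_true]
  constructor
  · intro h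
    rcases List.exists_mem_of_ne_nil _ h with ⟨j, hj⟩
    rcases List.mem_map.mp hj with ⟨q, hq, rfl⟩
    have hq' := List.mem_filter.mp hq
    rcases List.mem_zipIdx hq'.1 with ⟨-, hlt, heq⟩
    exact ⟨q.1, by rw [heq]; exact List.getElem_mem _, hq'.2⟩
  · rintro ⟨t, ht, hc⟩
    rcases List.mem_iff_getElem.mp ht with ⟨i, hi, rfl⟩
    intro hnil
    have hmemz : (ntuple[i], i) ∈ ntuple.zipIdx := by
      have h0 := List.getElem_zipIdx (l := ntuple) (i := i) (j := 0) (by simpa using hi)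
      simp only [Nat.zero_add] at h0
      rw [← h0]
      exact List.getElem_mem _
    have : i ∈ List.map (fun q : String × Nat => q.2) (List.filter (fun q => prefs.contains q.1) ntuple.zipIdx) :=
      List.mem_map.mpr ⟨(ntuple[i], i), List.mem_filter.mpr ⟨hmemz, hc⟩, rfl⟩
    rw [hnil] at this
    simp at this

theorem pvDictOf_get?_aux (f : Nat → Int) : ∀ (rs : List Nat) (d : PySem.Dict Nat Int) (k : Nat),
    (rs.foldl (fun d r => d.insert r (f r)) d).get? k = if k ∈ rs then some (f k) else d.get? k := by
  intro rs
  induction rs with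
  | nil => intro d k; simp
  | cons r rest ih =>
    intro d k
    rw [List.foldl_cons, ih]
    by_cases hk : k ∈ rest
    · simp [hk]
    · by_cases hkr : k = r
      · simp [hkr]
      · simp [hk, hkr, PySem.Dict.get?_insert]

-- dict {r: f(r) for r in rooms}
theorem pvDictOf_get? (rooms : List Nat) (f : Nat → Int) (k : Nat) :
    (pvB_dictOf rooms f).get? k = if k ∈ rooms then some (f k) else none := by
  rw [show pvB_dictOf rooms f = rooms.foldl (fun d r => d.insert r (f r)) PySem.Dict.empty from rfl,
    pvDictOf_get?_aux, PySem.Dict.get?_empty]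

theorem pvDictOf_keys_nodup (rooms : List Nat) (f : Nat → Int) : (pvB_dictOf rooms f).keys.Nodup :=
  PySem.Dict.nodup_keys_foldl_insert rooms (fun _ r => f r) PySem.Dict.empty PySem.Dict.nodup_keys_empty

theorem pvDictOf_mem_keys (rooms : List Nat) (f : Nat → Int) (k : Nat) :
    k ∈ (pvB_dictOf rooms f).keys ↔ k ∈ rooms := by
  rw [← PySem.Dict.contains_iff_mem_keys, PySem.Dict.contains_eq_isSome_get?, pvDictOf_get?]
  by_cases h : k ∈ rooms <;> simp [h]

theorem pvDictOf_keys_ne_nil (rooms : List Nat) (f : Nat → Int) (h : rooms ≠ []) :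
    (pvB_dictOf rooms f).keys ≠ [] := by
  rcases List.exists_mem_of_ne_nil _ h with ⟨r, hr⟩
  exact List.ne_nil_of_mem ((pvDictOf_mem_keys rooms f r).mpr hr)

-- values of a nodup-key dict, membership-wise
theorem pv_mem_values_iff (d : PySem.Dict Nat Int) (hnd : d.keys.Nodup) (v : Int) :
    v ∈ d.values ↔ ∃ k, d.get? k = some v := by
  constructor
  · intro hv
    rcases List.mem_map.mp hv with ⟨p, hp, rfl⟩
    exact ⟨p.1, PySem.Dict.get?_of_mem_items d (by simpa using hp) hnd⟩
  · rintro ⟨k, hk⟩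
    exact List.mem_map.mpr ⟨(k, v), PySem.Dict.mem_items_of_get?_eq_some d hk, rfl⟩

theorem pv_values_ne_nil (d : PySem.Dict Nat Int) (h : d.keys ≠ []) : d.values ≠ [] := by
  intro hv
  apply h
  have hit : d.items = [] := by
    have h2 : d.items.map (·.2) = [] := hv
    simpa using h2
  show d.items.map (·.1) = []
  rw [hit]; rfl

-- pvB_min is the minimum of the values
theorem pvB_min_spec (d : PySem.Dict Nat Int) (h : d.values ≠ []) :
    PySem.List.min? d.values (fun x => x) = some (pvB_min d) := by
  cases hm : PySem.List.min? d.values (fun x => x) with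
  | none => exact absurd ((PySem.List.min?_eq_none_iff _ _).mp hm) h
  | some m => simp [pvB_min, hm]

-- simulation invariant between A's INF-array dp and B's room→cost dict
def pvInv (n : Nat) (dp : List (Option Int)) (d : PySem.Dict Nat Int) : Prop :=
  dp.length = n ∧ d.keys.Nodup ∧ d.keys ≠ [] ∧ (∀ k ∈ d.keys, k < n) ∧
  ∀ r, r < n → dp.getD r none = d.get? r

-- the final `min(dp[r] ...)` equals min(dp.values())
theorem pv_min_sim {n : Nat} {dp : List (Option Int)} {d : PySem.Dict Nat Int} (h : pvInv n dp d) :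
    PySem.List.min? ((List.range n).filterMap (fun r => dp.getD r none)) (fun x => x) = some (pvB_min d) := by
  obtain ⟨hlen, hnd, hkne, hklt, hget⟩ := h
  have hvne := pv_values_ne_nil d hkne
  have hmin := pvB_min_spec d hvne
  have hmemL : ∀ v : Int, (v ∈ (List.range n).filterMap (fun r => dp.getD r none)) ↔ v ∈ d.values := by
    intro v
    rw [pv_mem_values_iff d hnd]
    simp only [List.mem_filterMap, List.mem_range]
    constructor
    · rintro ⟨r, hr, hv⟩
      exact ⟨r, by rw [← hget r hr]; exact hv⟩
    · rintro ⟨k, hk⟩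
      have hmemk : k ∈ d.keys := by
        by_contra hnk
        rw [(PySem.Dict.get?_eq_none_iff_not_mem_keys d k).mpr hnk] at hk
        exact Option.some_ne_none _ hk.symm
      have hkn := hklt k hmemk
      exact ⟨k, hkn, by rw [hget k hkn]; exact hk⟩
  have hmv : pvB_min d ∈ d.values := PySem.List.min?_mem hmin
  have hmL : pvB_min d ∈ (List.range n).filterMap (fun r => dp.getD r none) := (hmemL _).mpr hmv
  cases hL : PySem.List.min? ((List.range n).filterMap (fun r => dp.getD r none)) (fun x => x) with
  | none =>
    rw [PySem.List.min?_eq_none_iff] at hL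
    rw [hL] at hmL
    simp at hmL
  | some m' =>
    have h1 := PySem.List.min?_mem hL
    have h2 := PySem.List.min?_isMin hL _ hmL
    have h3 := PySem.List.min?_isMin hmin _ ((hmemL m').mp h1)
    have : m' = pvB_min d := le_antisymm h2 h3
    rw [this]

-- costs over which A's inner loop minimises
def pvCosts (n : Nat) (dp : List (Option Int)) (r : Nat) : List Int :=
  (List.range n).filterMap (fun p => (dp.getD p none).map (fun v => v + (if p = r then 0 else 1)))

def pvOFold (o : Option Int) (cs : List Int) : Option Int :=
  cs.foldl (fun o c => some (pvMinO o c)) o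

theorem pvOFold_some (a : Int) (cs : List Int) : pvOFold (some a) cs = some (cs.foldl min a) := by
  induction cs generalizing a with
  | nil => rfl
  | cons c cs ih => simpa only [pvOFold, List.foldl_cons, pvMinO] using ih (min a c)

theorem pvOFold_none (cs : List Int) : pvOFold none cs = PySem.List.min? cs (fun x => x) := by
  cases cs with
  | nil => rfl
  | cons c cs =>
    rw [PySem.List.min?_id_cons]
    show pvOFold (some (pvMinO none c)) cs = some (List.foldl min c cs)
    exact pvOFold_some c cs

theorem pvA_inner_go (dp : List (Option Int)) (r : Nat) :
    ∀ (l : List Nat) (nd : List (Option Int)), r < nd.length →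
    l.foldl (fun acc prev => acc.bind (fun nd =>
      match dp.getD prev none with
      | none => some nd
      | some v =>
        if r < nd.length then
          some (nd.set r (some (pvMinO (nd.getD r none) (v + (if prev = r then 0 else 1)))))
        else none)) (some nd)
    = some (nd.set r (pvOFold (nd.getD r none)
        (l.filterMap (fun p => (dp.getD p none).map (fun v => v + (if p = r then 0 else 1)))))) := by
  intro l
  induction l with
  | nil =>
    intro nd hr
    simp only [List.foldl_nil, List.filterMap_nil]
    rw [show pvOFold (nd.getD r none) [] = nd.getD r none from rfl]
    rw [List.getD_eq_getElem?_getD, List.getElem?_eq_getElem hr]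
    simp [List.set_getElem_self]
  | cons p l ih =>
    intro nd hr
    rw [List.foldl_cons, List.filterMap_cons]
    cases hdp : dp.getD p none with
    | none =>
      simp only [Option.bind_some]
      exact ih nd hr
    | some v =>
      simp only [Option.bind_some, if_pos hr, Option.map_some]
      rw [ih _ (by simpa using hr)]
      rw [List.set_set]
      have hget : (nd.set r (some (pvMinO (nd.getD r none) (v + (if p = r then 0 else 1))))).getD r none
          = some (pvMinO (nd.getD r none) (v + (if p = r then 0 else 1))) := by
        rw [List.getD_eq_getElem?_getD, List.getElem?_set_self hr]
        rfl
      rw [hget]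
      rfl

theorem pvA_inner_char (dp : List (Option Int)) (r n : Nat) (nd : List (Option Int)) (hr : r < nd.length) :
    pvA_inner dp r n nd = some (nd.set r (pvOFold (nd.getD r none) (pvCosts n dp r))) := by
  unfold pvA_inner pvCosts
  exact pvA_inner_go dp r (List.range n) nd hr

-- min over the inner-loop costs = global-min transition
theorem pv_min_costs {n : Nat} {dp : List (Option Int)} {d : PySem.Dict Nat Int}
    (h : pvInv n dp d) (r : Nat) :
    PySem.List.min? (pvCosts n dp r) (fun x => x)
      = some (min (PySem.Dict.getD d r (pvB_min d + 1)) (pvB_min d + 1)) := by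
  obtain ⟨hlen, hnd, hkne, hklt, hget⟩ := h
  have hvne := pv_values_ne_nil d hkne
  have hmin := pvB_min_spec d hvne
  set m := pvB_min d with hm
  have hmval : m ∈ d.values := PySem.List.min?_mem hmin
  have hmle : ∀ v ∈ d.values, m ≤ v := fun v hv => PySem.List.min?_isMin hmin v hv
  have hmemC : ∀ c : Int, c ∈ pvCosts n dp r ↔
      ∃ p, p < n ∧ ∃ v, d.get? p = some v ∧ c = v + (if p = r then 0 else 1) := by
    intro c
    unfold pvCosts
    simp only [List.mem_filterMap, List.mem_range, Option.map_eq_some_iff]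
    constructor
    · rintro ⟨p, hp, v, hv, rfl⟩
      exact ⟨p, hp, v, by rw [← hget p hp]; exact hv, rfl⟩
    · rintro ⟨p, hp, v, hv, rfl⟩
      exact ⟨p, hp, v, by rw [hget p hp]; exact hv, rfl⟩
  obtain ⟨k, hk⟩ := (pv_mem_values_iff d hnd m).mp hmval
  have hkmem : k ∈ d.keys := by
    by_contra hnk
    rw [(PySem.Dict.get?_eq_none_iff_not_mem_keys d k).mpr hnk] at hk
    exact Option.some_ne_none _ hk.symm
  have hkn := hklt k hkmem
  have hcstar : (m + (if k = r then 0 else 1)) ∈ pvCosts n dp r :=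
    (hmemC _).mpr ⟨k, hkn, m, hk, rfl⟩
  have hvalmem : ∀ p v, d.get? p = some v → v ∈ d.values := by
    intro p v hv
    exact (pv_mem_values_iff d hnd v).mpr ⟨p, hv⟩
  rw [PySem.Dict.getD_eq_get?_getD]
  cases hgr : d.get? r with
  | none =>
    simp only [Option.getD_none, min_self]
    have hker : k ≠ r := fun h => by rw [h, hgr] at hk; exact Option.some_ne_none _ hk.symm
    rw [if_neg hker] at hcstar
    cases hC : PySem.List.min? (pvCosts n dp r) (fun x => x) with
    | none =>
      rw [PySem.List.min?_eq_none_iff] at hC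
      rw [hC] at hcstar
      simp at hcstar
    | some c0 =>
      have h1 := (hmemC c0).mp (PySem.List.min?_mem hC)
      have h2 := PySem.List.min?_isMin hC _ hcstar
      obtain ⟨p, hp, v, hv, rfl⟩ := h1
      have hpr : p ≠ r := fun h => by rw [h, hgr] at hv; exact Option.some_ne_none _ hv.symm
      have hmv := hmle v (hvalmem p v hv)
      rw [if_neg hpr]
      rw [if_neg hpr] at h2
      congr 1
      omega
  | some vr =>
    simp only [Option.getD_some]
    have hmvr := hmle vr (hvalmem r vr hgr)
    have hrn : r < n := hklt r (by
      by_contra hnk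
      rw [(PySem.Dict.get?_eq_none_iff_not_mem_keys d r).mpr hnk] at hgr
      exact Option.some_ne_none _ hgr.symm)
    have hvrC : vr ∈ pvCosts n dp r := by
      have hh := (hmemC (vr + (if r = r then 0 else 1))).mpr ⟨r, hrn, vr, hgr, rfl⟩
      simpa using hh
    cases hC : PySem.List.min? (pvCosts n dp r) (fun x => x) with
    | none =>
      rw [PySem.List.min?_eq_none_iff] at hC
      rw [hC] at hvrC
      simp at hvrC
    | some c0 =>
      have h1 := (hmemC c0).mp (PySem.List.min?_mem hC)
      have h2 := PySem.List.min?_isMin hC _ hvrC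
      have h3 := PySem.List.min?_isMin hC _ hcstar
      obtain ⟨p, hp, v, hv, rfl⟩ := h1
      have hmv := hmle v (hvalmem p v hv)
      congr 1
      by_cases hpr : p = r
      · rw [hpr, hgr] at hv
        have hvvr : v = vr := (Option.some.inj hv).symm
        subst hvvr
        rw [if_pos hpr]
        by_cases hkr : k = r
        · rw [if_pos hkr] at h3
          omega
        · rw [if_neg hkr] at h3
          omega
      · rw [if_neg hpr]
        by_cases hkr : k = r
        · rw [if_pos hkr] at h3
          rw [hkr, hgr] at hk
          have hmvr2 : m = vr := (Option.some.inj hk).symm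
          omega
        · rw [if_neg hkr] at h3
          omega

theorem pvA_step_char {n : Nat} {dp : List (Option Int)} {d : PySem.Dict Nat Int}
    (h : pvInv n dp d) :
    ∀ (rooms : List Nat), rooms.Nodup → (∀ j ∈ rooms, j < n) →
    ∀ (acc : List (Option Int)), acc.length = n → (∀ j ∈ rooms, acc.getD j none = none) →
    ∃ nd, rooms.foldl (fun a r => a.bind (fun x => pvA_inner dp r n x)) (some acc) = some nd ∧
      nd.length = n ∧
      ∀ j, j < n → nd.getD j none =
        if j ∈ rooms then some (min (PySem.Dict.getD d j (pvB_min d + 1)) (pvB_min d + 1))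
        else acc.getD j none := by
  intro rooms
  induction rooms with
  | nil =>
    intro _ _ acc hlen hjn
    exact ⟨acc, by simp, hlen, by intro j _; simp⟩
  | cons r rest ih =>
    intro hnd hlt acc hlen hjn
    have hrn : r < n := hlt r (by simp)
    have hracc : r < acc.length := by rw [hlen]; exact hrn
    have haccr : acc.getD r none = none := hjn r (by simp)
    have hinner := pvA_inner_char dp r n acc hracc
    rw [haccr, pvOFold_none, pv_min_costs h r] at hinner
    have hnodup := List.nodup_cons.mp hnd
    have hltrest : ∀ j ∈ rest, j < n := fun j hj => hlt j (List.mem_cons_of_mem _ hj)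
    have hlen' : (acc.set r (some (min (PySem.Dict.getD d r (pvB_min d + 1)) (pvB_min d + 1)))).length = n := by
      simpa using hlen
    have hjn' : ∀ j ∈ rest,
        (acc.set r (some (min (PySem.Dict.getD d r (pvB_min d + 1)) (pvB_min d + 1)))).getD j none = none := by
      intro j hj
      have hjr : r ≠ j := fun hh => hnodup.1 (hh ▸ hj)
      rw [List.getD_eq_getElem?_getD, List.getElem?_set_ne hjr, ← List.getD_eq_getElem?_getD]
      exact hjn j (List.mem_cons_of_mem _ hj)
    obtain ⟨nd, hfold, hndlen, hchar⟩ := ih hnodup.2 hltrest _ hlen' hjn'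
    refine ⟨nd, ?_, hndlen, ?_⟩
    · rw [List.foldl_cons]
      rw [show ((some acc).bind (fun x => pvA_inner dp r n x)) = pvA_inner dp r n acc from rfl, hinner]
      exact hfold
    · intro j hj
      rw [hchar j hj]
      by_cases hjrest : j ∈ rest
      · rw [if_pos hjrest, if_pos (List.mem_cons_of_mem _ hjrest)]
      · by_cases hjr : j = r
        · subst hjr
          rw [if_neg hjrest, if_pos (by simp)]
          rw [List.getD_eq_getElem?_getD, List.getElem?_set_self hracc]
          rfl
        · have hnotin : j ∉ (r :: rest) := by simp [hjr, hjrest]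
          rw [if_neg hjrest, if_neg hnotin]
          rw [List.getD_eq_getElem?_getD, List.getElem?_set_ne (fun hh => hjr hh.symm), ← List.getD_eq_getElem?_getD]

theorem pvA_step_sim {n : Nat} {dp : List (Option Int)} {d : PySem.Dict Nat Int}
    (h : pvInv n dp d) (rooms : List Nat) (hne : rooms ≠ []) (hnd : rooms.Nodup)
    (hlt : ∀ j ∈ rooms, j < n) :
    ∃ nd, pvA_step n dp rooms = some nd ∧
      pvInv n nd (pvB_dictOf rooms (fun r => min (PySem.Dict.getD d r (pvB_min d + 1)) (pvB_min d + 1))) := by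
  obtain ⟨nd, hfold, hndlen, hchar⟩ := pvA_step_char h rooms hnd hlt
      (List.replicate n none) (by simp)
      (by intro j _; rw [List.getD_eq_getElem?_getD, List.getElem?_replicate]; split <;> rfl)
  refine ⟨nd, ?_, hndlen, pvDictOf_keys_nodup _ _, pvDictOf_keys_ne_nil _ _ hne, ?_, ?_⟩
  · unfold pvA_step
    exact hfold
  · intro k hk
    exact hlt k ((pvDictOf_mem_keys _ _ k).mp hk)
  · intro r hr
    rw [hchar r hr, pvDictOf_get?]
    by_cases hmem : r ∈ rooms
    · rw [if_pos hmem, if_pos hmem]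
    · rw [if_neg hmem, if_neg hmem]
      rw [List.getD_eq_getElem?_getD, List.getElem?_replicate]
      split <;> rfl

theorem pvA_init_char : ∀ (rooms : List Nat) (acc : List (Option Int)), (∀ j ∈ rooms, j < acc.length) →
    ∃ nd, rooms.foldl (fun acc r => acc.bind (fun dp => if r < dp.length then some (dp.set r (some 0)) else none)) (some acc) = some nd ∧
      nd.length = acc.length ∧
      ∀ j, nd.getD j none = if j ∈ rooms then some 0 else acc.getD j none := by
  intro rooms
  induction rooms with
  | nil =>
    intro acc _
    exact ⟨acc, by simp, rfl, by intro j; simp⟩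
  | cons r rest ih =>
    intro acc hlt
    have hr : r < acc.length := hlt r (by simp)
    have hlt' : ∀ j ∈ rest, j < (acc.set r (some 0)).length := by
      intro j hj
      rw [List.length_set]
      exact hlt j (List.mem_cons_of_mem _ hj)
    obtain ⟨nd, hfold, hlen, hchar⟩ := ih (acc.set r (some 0)) hlt'
    refine ⟨nd, ?_, by rw [hlen, List.length_set], ?_⟩
    · rw [List.foldl_cons]
      rw [show ((some acc).bind (fun dp => if r < dp.length then some (dp.set r (some (0:Int))) else none))
          = if r < acc.length then some (acc.set r (some 0)) else none from rfl, if_pos hr]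
      exact hfold
    · intro j
      rw [hchar j]
      by_cases hjrest : j ∈ rest
      · rw [if_pos hjrest, if_pos (by simp [hjrest])]
      · by_cases hjr : j = r
        · subst hjr
          rw [if_neg hjrest, if_pos (by simp)]
          rw [List.getD_eq_getElem?_getD, List.getElem?_set_self hr]
          rfl
        · rw [if_neg hjrest, if_neg (by simp [hjr, hjrest])]
          rw [List.getD_eq_getElem?_getD, List.getElem?_set_ne (fun hh => hjr hh.symm), ← List.getD_eq_getElem?_getD]

theorem pvA_init_sim {n : Nat} (rooms : List Nat) (hne : rooms ≠ []) (hlt : ∀ j ∈ rooms, j < n) :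
    ∃ dp0, pvA_init n rooms = some dp0 ∧ pvInv n dp0 (pvB_dictOf rooms (fun _ => 0)) := by
  obtain ⟨dp0, hfold, hlen, hchar⟩ := pvA_init_char rooms (List.replicate n none)
      (by intro j hj; rw [List.length_replicate]; exact hlt j hj)
  rw [List.length_replicate] at hlen
  refine ⟨dp0, ?_, hlen, pvDictOf_keys_nodup _ _, pvDictOf_keys_ne_nil _ _ hne, ?_, ?_⟩
  · unfold pvA_init
    exact hfold
  · intro k hk
    exact hlt k ((pvDictOf_mem_keys _ _ k).mp hk)
  · intro r _
    rw [hchar r, pvDictOf_get?]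
    by_cases hmem : r ∈ rooms
    · rw [if_pos hmem, if_pos hmem]
    · rw [if_neg hmem, if_neg hmem]
      rw [List.getD_eq_getElem?_getD, List.getElem?_replicate]
      split <;> rfl

-- B's per-participant fold, over the room lists
def pvB_go (dp : Option (PySem.Dict Nat Int)) (rooms : List Nat) : Option (PySem.Dict Nat Int) :=
  if rooms.isEmpty then dp
  else match dp with
    | none => some (pvB_dictOf rooms (fun _ => 0))
    | some d => some (pvB_dictOf rooms (fun r => min (PySem.Dict.getD d r (pvB_min d + 1)) (pvB_min d + 1)))

theorem pvB_part_eq_go (block_tuples : List (List String)) (prefs : List String) :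
    pvB_part block_tuples prefs =
      match (block_tuples.map (pvRoomsB prefs)).foldl pvB_go none with
      | none => 0
      | some d => pvB_min d := by
  unfold pvB_part
  rw [List.foldl_map]
  rfl

theorem pv_loop_sim {n : Nat} : ∀ (rest : List (List Nat)) {dp : List (Option Int)} {d : PySem.Dict Nat Int},
    pvInv n dp d → (∀ rooms ∈ rest, rooms.Nodup ∧ ∀ j ∈ rooms, j < n) →
    ∃ nd d', pvA_loop n (some dp) rest = some nd ∧ rest.foldl pvB_go (some d) = some d' ∧ pvInv n nd d' := by
  intro rest
  induction rest with
  | nil =>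
    intro dp d hInv _
    exact ⟨dp, d, rfl, rfl, hInv⟩
  | cons rooms rest ih =>
    intro dp d hInv hg
    have hgr := hg rooms (by simp)
    have hgrest : ∀ r ∈ rest, r.Nodup ∧ ∀ j ∈ r, j < n := fun r hr => hg r (List.mem_cons_of_mem _ hr)
    by_cases he : rooms.isEmpty = true
    · have hA : pvA_loop n (some dp) (rooms :: rest) = pvA_loop n (some dp) rest := by
        unfold pvA_loop
        rw [List.foldl_cons, if_pos he]
      have hB : (rooms :: rest).foldl pvB_go (some d) = rest.foldl pvB_go (some d) := by
        rw [List.foldl_cons]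
        show rest.foldl pvB_go (pvB_go (some d) rooms) = _
        unfold pvB_go
        rw [if_pos he]
      rw [hA, hB]
      exact ih hInv hgrest
    · have hne : rooms ≠ [] := fun hh => he (by simp [hh])
      obtain ⟨nd, hstep, hInv'⟩ := pvA_step_sim hInv rooms hne hgr.1 hgr.2
      have hA : pvA_loop n (some dp) (rooms :: rest) = pvA_loop n (some nd) rest := by
        unfold pvA_loop
        rw [List.foldl_cons, if_neg (by simp [he]), Option.bind_some, hstep]
      have hB : (rooms :: rest).foldl pvB_go (some d) = rest.foldl pvB_go
          (some (pvB_dictOf rooms (fun r => min (PySem.Dict.getD d r (pvB_min d + 1)) (pvB_min d + 1)))) := by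
        rw [List.foldl_cons]
        show rest.foldl pvB_go (pvB_go (some d) rooms) = _
        unfold pvB_go
        rw [if_neg (by simp [he])]
      rw [hA, hB]
      exact ih hInv' hgrest

theorem pv_find_sim {n : Nat} : ∀ (pr : List (List Nat)),
    (∀ rooms ∈ pr, rooms.Nodup ∧ ∀ j ∈ rooms, j < n) →
    (∃ rooms ∈ pr, rooms.isEmpty = false) →
    ∃ d', pr.foldl pvB_go none = some d' ∧ pvA_find n pr = some (pvB_min d') := by
  intro pr
  induction pr with
  | nil =>
    rintro _ ⟨rooms, h, _⟩
    exact absurd h (List.not_mem_nil)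
  | cons rooms rest ih =>
    intro hg hex
    by_cases he : rooms.isEmpty = true
    · have hA : pvA_find n (rooms :: rest) = pvA_find n rest := by
        simp only [pvA_find]
        rw [if_pos he]
      have hB : (rooms :: rest).foldl pvB_go none = rest.foldl pvB_go none := by
        rw [List.foldl_cons]
        show rest.foldl pvB_go (pvB_go none rooms) = _
        unfold pvB_go
        rw [if_pos he]
      obtain ⟨r', hr', hr'e⟩ := hex
      rcases List.mem_cons.mp hr' with rfl | hmem
      · rw [he] at hr'e
        cases hr'e
      · rw [hA, hB]
        exact ih (fun r hr => hg r (List.mem_cons_of_mem _ hr)) ⟨r', hmem, hr'e⟩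
    · have hne : rooms ≠ [] := fun hh => he (by simp [hh])
      have hgr := hg rooms (by simp)
      obtain ⟨dp0, hinit, hInv0⟩ := pvA_init_sim rooms hne hgr.2
      obtain ⟨nd, d', hloop, hfoldB, hInv'⟩ := pv_loop_sim rest hInv0 (fun r hr => hg r (List.mem_cons_of_mem _ hr))
      refine ⟨d', ?_, ?_⟩
      · rw [List.foldl_cons]
        have h0 : pvB_go none rooms = some (pvB_dictOf rooms (fun _ => 0)) := by
          unfold pvB_go
          rw [if_neg (by simp [he])]
        rw [show (List.foldl pvB_go (pvB_go none rooms) rest) = rest.foldl pvB_go (pvB_go none rooms) from rfl, h0]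
        exact hfoldB
      · simp only [pvA_find]
        rw [if_neg he, hinit, Option.bind_some, hloop, Option.bind_some]
        exact pv_min_sim hInv'

-- all-zero dict has min 0
theorem pvB_min_zero (rooms : List Nat) (h : rooms ≠ []) : pvB_min (pvB_dictOf rooms (fun _ => 0)) = 0 := by
  have hne := pvDictOf_keys_ne_nil rooms (fun _ => 0) h
  have hvne := pv_values_ne_nil _ hne
  have hmin := pvB_min_spec _ hvne
  have hmem := PySem.List.min?_mem hmin
  obtain ⟨k, hk⟩ := (pv_mem_values_iff _ (pvDictOf_keys_nodup _ _) _).mp hmem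
  rw [pvDictOf_get?] at hk
  by_cases hkr : k ∈ rooms
  · rw [if_pos hkr] at hk
    exact (Option.some.inj hk).symm
  · rw [if_neg hkr] at hk
    exact absurd hk.symm (Option.some_ne_none _)

theorem pvB_go_all_empty (rest : List (List Nat)) (h : ∀ rooms ∈ rest, rooms.isEmpty = true) :
    ∀ a, rest.foldl pvB_go a = a := by
  induction rest with
  | nil => intro a; rfl
  | cons rooms rest ih =>
    intro a
    rw [List.foldl_cons]
    have h0 : pvB_go a rooms = a := by
      unfold pvB_go
      rw [if_pos (h rooms (by simp))]
    rw [show (List.foldl pvB_go (pvB_go a rooms) rest) = rest.foldl pvB_go (pvB_go a rooms) from rfl, h0]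
    exact ih (fun r hr => h r (List.mem_cons_of_mem _ hr)) a

-- when at most one tuple is attended, B returns 0
theorem pvB_le_one (pr : List (List Nat)) (h : (pr.filter (fun rs => !rs.isEmpty)).length ≤ 1) :
    (match pr.foldl pvB_go none with | none => (0 : Int) | some d => pvB_min d) = 0 := by
  revert h
  induction pr with
  | nil => intro _; rfl
  | cons rooms rest ih =>
    intro h
    by_cases he : rooms.isEmpty = true
    · rw [List.foldl_cons]
      have h1 : pvB_go none rooms = none := by
        unfold pvB_go
        rw [if_pos he]
      rw [show (List.foldl pvB_go (pvB_go none rooms) rest) = rest.foldl pvB_go (pvB_go none rooms) from rfl, h1]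
      apply ih
      simpa [List.filter_cons, he] using h
    · rw [List.foldl_cons]
      have hne : rooms ≠ [] := fun hh => he (by simp [hh])
      have h1 : pvB_go none rooms = some (pvB_dictOf rooms (fun _ => 0)) := by
        unfold pvB_go
        rw [if_neg (by simp [he])]
      rw [show (List.foldl pvB_go (pvB_go none rooms) rest) = rest.foldl pvB_go (pvB_go none rooms) from rfl, h1]
      have he' : rooms.isEmpty = false := by revert he; cases rooms.isEmpty <;> simp
      have hlen0 : (rest.filter (fun rs => !rs.isEmpty)).length = 0 := by
        have hcons : (rooms :: rest).filter (fun rs => !rs.isEmpty)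
            = rooms :: rest.filter (fun rs => !rs.isEmpty) := by
          rw [List.filter_cons]
          simp [he']
        rw [hcons, List.length_cons] at h
        omega
      have hrest : ∀ rooms' ∈ rest, rooms'.isEmpty = true := by
        rw [List.length_eq_zero_iff] at hlen0
        intro r' hr'
        by_contra hf
        have hmem : r' ∈ rest.filter (fun rs => !rs.isEmpty) :=
          List.mem_filter.mpr ⟨hr', by simpa using hf⟩
        rw [hlen0] at hmem
        simp at hmem
      rw [pvB_go_all_empty rest hrest]
      exact pvB_min_zero rooms hne

theorem pv_count_eq (prefs : List String) (bt : List (List String)) :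
    ((bt.map (pvRoomsB prefs)).filter (fun rs => !rs.isEmpty)).length
      = (bt.filter (fun tp => tp.any (fun t => prefs.contains t))).length := by
  rw [List.filter_map, List.length_map]
  congr 1
  apply List.filter_congr
  intro tp _
  show (!(pvRoomsB prefs tp).isEmpty) = tp.any fun t => prefs.contains t
  cases hh : (pvRoomsB prefs tp).isEmpty with
  | false =>
    rw [(pvRooms_nonempty_iff prefs tp).mp hh]
    rfl
  | true =>
    cases ha : tp.any (fun t => prefs.contains t) with
    | false => simp
    | true =>
      rw [(pvRooms_nonempty_iff prefs tp).mpr ha] at hh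
      cases hh

-- per-participant agreement under ¬bad
theorem pv_part_eq (block_tuples : List (List String)) (prefs : List String)
    (h : pvBad block_tuples prefs = false) :
    pvA_part block_tuples prefs = some (pvB_part block_tuples prefs) := by
  cases block_tuples with
  | nil => rfl
  | cons t0 bt' =>
    rw [pvB_part_eq_go]
    have hmapeq : (t0 :: bt').map (pvRoomsA prefs) = (t0 :: bt').map (pvRoomsB prefs) :=
      List.map_congr_left (fun tp _ => pvRooms_eq prefs tp)
    have hA : pvA_part (t0 :: bt') prefs =
        (if ((((t0 :: bt').map (pvRoomsB prefs)).filter (fun rs => !rs.isEmpty)).length ≤ 1) then some 0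
         else pvA_find t0.length ((t0 :: bt').map (pvRoomsB prefs))) := by
      show (if ((((t0 :: bt').map (pvRoomsA prefs)).filter (fun rs => !rs.isEmpty)).length ≤ 1) then some 0
            else pvA_find t0.length ((t0 :: bt').map (pvRoomsA prefs))) = _
      rw [hmapeq]
    rw [hA, pv_count_eq]
    by_cases hle : ((t0 :: bt').filter (fun tp => tp.any (fun t => prefs.contains t))).length ≤ 1
    · rw [if_pos hle]
      have hres := pvB_le_one ((t0 :: bt').map (pvRoomsB prefs)) (by rw [pv_count_eq]; exact hle)
      rw [hres]
    · rw [if_neg hle]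
      have hcnt : 1 < ((t0 :: bt').filter (fun tp => tp.any (fun t => prefs.contains t))).length :=
        Nat.lt_of_not_le hle
      have hnohigh : ((t0 :: bt').any (fun tp => tp.zipIdx.any
          (fun q => prefs.contains q.1 && decide ((t0 :: bt').headI.length ≤ q.2)))) = false := by
        unfold pvBad at h
        rw [Bool.and_eq_false_iff] at h
        rcases h with h | h
        · rw [decide_eq_false_iff_not] at h
          exact absurd hcnt h
        · exact h
      have hg : ∀ rooms ∈ (t0 :: bt').map (pvRoomsB prefs), rooms.Nodup ∧ ∀ j ∈ rooms, j < t0.length := by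
        intro rooms hr
        rcases List.mem_map.mp hr with ⟨tp, htp, rfl⟩
        refine ⟨pvRooms_nodup _ _, ?_⟩
        intro j hj
        rcases List.mem_map.mp hj with ⟨q, hq, rfl⟩
        have hq' := List.mem_filter.mp hq
        rw [List.any_eq_false] at hnohigh
        have h1 := hnohigh tp htp
        have h1' : (tp.zipIdx.any
            (fun q => prefs.contains q.1 && decide ((t0 :: bt').headI.length ≤ q.2))) = false := by
          revert h1
          cases tp.zipIdx.any (fun q => prefs.contains q.1 && decide ((t0 :: bt').headI.length ≤ q.2)) <;> simp
        rw [List.any_eq_false] at h1'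
        have h2 := h1' q hq'.1
        have h2' : (prefs.contains q.1 && decide ((t0 :: bt').headI.length ≤ q.2)) = false := by
          revert h2
          cases prefs.contains q.1 && decide ((t0 :: bt').headI.length ≤ q.2) <;> simp
        rw [Bool.and_eq_false_iff] at h2'
        rcases h2' with h2' | h2'
        · rw [hq'.2] at h2'
          simp at h2'
        · rw [decide_eq_false_iff_not] at h2'
          simp only [List.headI] at h2'
          omega
      have hex : ∃ rooms ∈ (t0 :: bt').map (pvRoomsB prefs), rooms.isEmpty = false := by
        by_contra hnex
        simp only [not_exists, not_and] at hnex
        have hnil : ((t0 :: bt').map (pvRoomsB prefs)).filter (fun rs => !rs.isEmpty) = [] := by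
          rw [List.filter_eq_nil_iff]
          intro rs hrs
          have hne := hnex rs hrs
          have htrue : rs.isEmpty = true := by revert hne; cases rs.isEmpty <;> simp
          simp [htrue]
        have hcc := pv_count_eq prefs (t0 :: bt')
        rw [hnil] at hcc
        simp only [List.length_nil] at hcc
        omega
      obtain ⟨d', hfoldB, hfind⟩ := pv_find_sim ((t0 :: bt').map (pvRoomsB prefs)) hg hex
      rw [hfind, hfoldB]

theorem pv_outer (block_tuples : List (List String)) :
    ∀ (items : List (String × List String)) (t : Int),
    (∀ p ∈ items, pvBad block_tuples p.2 = false) →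
    items.foldl (fun acc p => acc.bind (fun t => (pvA_part block_tuples p.2).map (fun v => t + v))) (some t)
      = some (t + (items.map (fun p => pvB_part block_tuples p.2)).sum) := by
  intro items
  induction items with
  | nil =>
    intro t _
    simp
  | cons p rest ih =>
    intro t hall
    rw [List.foldl_cons]
    have hp := pv_part_eq block_tuples p.2 (hall p (by simp))
    rw [show ((some t).bind (fun t => (pvA_part block_tuples p.2).map (fun v => t + v)))
        = (pvA_part block_tuples p.2).map (fun v => t + v) from rfl, hp]
    simp only [Option.map_some]
    rw [ih (t + pvB_part block_tuples p.2) (fun q hq => hall q (List.mem_cons_of_mem _ hq))]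
    simp [add_assoc]

-- ===== VERDICT (by name: the statement is the Claim_ definition above) =====
theorem compute_block_hopping_spec : Claim_equal_compute_block_hopping := by
  intro block_tuples preferences _ hPre
  unfold Spec_compute_block_hopping compute_block_hopping compute_block_hopping_alt
  rw [pv_outer block_tuples (pvPrefItems preferences) 0 hPre]
  simp
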